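-- pv_equiv track=rewrite | github.com/hoangthanhtien/coin_watcher_backend | seg4DigitDisplay.py | splitToDisplay
-- ===== SOURCE A (Python) =====
-- def splitToDisplay(toDisplay):  # splits string to digits to display
--     arrToDisplay = list(toDisplay)
--     for i in range(len(arrToDisplay)):
--         if arrToDisplay[i] == ".":
--             arrToDisplay[(i - 1)] = (
--                 arrToDisplay[(i - 1)] + arrToDisplay[i]
--             )  # dots are concatenated to previous array element
--     while "." in arrToDisplay:
--         arrToDisplay.remove(".")  # array items containing dot char alone are removed
--     return arrToDisplay
-- ===== SOURCE B (Python) =====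
-- def splitToDisplay(toDisplay):  # one forward pass: look ahead for a dot, skip standalone dots
--     out = []
--     n = len(toDisplay)
--     for i in range(n):
--         cell = toDisplay[i]
--         if i + 1 < n and toDisplay[i + 1] == ".":
--             cell += "."
--         if cell != ".":
--             out.append(cell)
--     return out
-- ===== Notes on version B (the rewrite author's own statement) =====
-- stated objective: simpler
-- what changed: B replaces A's two-phase algorithm (mutate the previous array element for every dot, then sweep standalone dots out with a while/remove loop) by a single forward pass that looks one character ahead and appends only non-dot cells.
-- intended difference: On strings that start with a dot, A's negative-index wraparound attaches that leading dot to the LAST cell (A('.5') = ['5.']); B simply drops the orphan leading dot (B('.5') = ['5']), which is the intended behaviour since there is no previous cell to attach it to. — e.g. on splitToDisplay(".5"): A returns ["5."], B returns ["5"]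
import Mathlib
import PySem

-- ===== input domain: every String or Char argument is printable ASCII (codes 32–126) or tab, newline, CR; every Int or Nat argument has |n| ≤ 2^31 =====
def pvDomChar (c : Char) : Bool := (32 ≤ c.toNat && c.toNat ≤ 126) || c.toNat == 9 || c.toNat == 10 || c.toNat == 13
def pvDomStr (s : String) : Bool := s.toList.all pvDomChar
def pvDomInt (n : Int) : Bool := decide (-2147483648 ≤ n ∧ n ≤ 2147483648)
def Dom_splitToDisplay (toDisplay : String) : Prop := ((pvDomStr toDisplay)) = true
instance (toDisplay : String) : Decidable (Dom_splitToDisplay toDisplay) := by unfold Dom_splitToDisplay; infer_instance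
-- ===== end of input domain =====

-- B is a single look-ahead pass instead of A's mutate-previous + while/remove sweep; on
-- strings starting with '.' (D_ below) B intentionally drops the orphan leading dot where
-- A's negative-index wraparound attaches it to the last cell.

-- ===== PORT A =====
-- cells are kept as List Char (Python str ↔ its characters); String.ofList only at the return
def pvOrig (cs : List Char) : List (List Char) := cs.map (fun c => [c])

-- body of 'for i in range(len(arr)): if arr[i] == ".": arr[i-1] = arr[i-1] + arr[i]'
def pvStep (arr : List (List Char)) (i : Int) : List (List Char) :=
  if PySem.List.pyGet? arr i = some ['.'] then
    PySem.List.pySetD arr (i - 1)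
      (PySem.List.pyGetD arr (i - 1) [] ++ PySem.List.pyGetD arr i [])
  else arr

-- 'while "." in arr: arr.remove(".")'; fuel = arr.length bounds the passes (each removes one element)
def pvWhileRemove (fuel : Nat) (arr : List (List Char)) : List (List Char) :=
  match fuel with
  | 0 => arr
  | fuel + 1 => if ['.'] ∈ arr then pvWhileRemove fuel (arr.erase ['.']) else arr

def splitToDisplay (toDisplay : String) : List String :=
  let arr0 := pvOrig toDisplay.toList
  let arr := (PySem.List.pyRange 0 arr0.length 1).foldl pvStep arr0
  (pvWhileRemove arr.length arr).map String.ofList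

-- ===== PORT B =====
-- single forward pass with one-character lookahead; standalone dots are never appended
def pvAltGo : List Char → List (List Char)
  | [] => []
  | c :: rest =>
    let cell := if rest.head? = some '.' then [c, '.'] else [c]
    if cell = ['.'] then pvAltGo rest else cell :: pvAltGo rest

def splitToDisplay_alt (toDisplay : String) : List String :=
  (pvAltGo toDisplay.toList).map String.ofList

-- ===== PRECONDITION & SPEC =====
-- On strings that start with a dot, A's negative-index wraparound attaches that leading dot
-- to the LAST cell (A ".5" = ["5."]); B drops the orphan leading dot (B ".5" = ["5"]),
-- the intended behaviour since there is no previous cell to attach it to.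
def D_splitToDisplay (toDisplay : String) : Prop := toDisplay.toList.head? = some '.'
instance (toDisplay : String) : Decidable (D_splitToDisplay toDisplay) := by
  unfold D_splitToDisplay; infer_instance

def Spec_splitToDisplay (toDisplay : String) (out : List String) : Prop :=
  ¬ D_splitToDisplay toDisplay → out = splitToDisplay_alt toDisplay
instance (toDisplay : String) (out : List String) : Decidable (Spec_splitToDisplay toDisplay out) := by
  unfold Spec_splitToDisplay; infer_instance

def pvDiffWitness_splitToDisplay : String := ".5"
def pvDiffWitnessOut_splitToDisplay : (List String) × (List String) := (["5."], ["5"])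

-- ===== CLAIM (what is proved, stated in full; the proofs are below) =====
def Claim_unchanged_splitToDisplay : Prop :=
  ∀ (toDisplay : String), Dom_splitToDisplay toDisplay →
    Spec_splitToDisplay toDisplay (splitToDisplay toDisplay)
def Claim_changed_splitToDisplay : Prop :=
  Dom_splitToDisplay (pvDiffWitness_splitToDisplay) ∧
  D_splitToDisplay (pvDiffWitness_splitToDisplay) ∧
  splitToDisplay (pvDiffWitness_splitToDisplay) = pvDiffWitnessOut_splitToDisplay.1 ∧
  splitToDisplay_alt (pvDiffWitness_splitToDisplay) = pvDiffWitnessOut_splitToDisplay.2 ∧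
  pvDiffWitnessOut_splitToDisplay.1 ≠ pvDiffWitnessOut_splitToDisplay.2

-- ===== LEMMAS AND PROOFS =====

-- the per-cell result of A's first pass: cell j = char j, plus '.' when the next char is a dot
def pvFinal : List Char → List (List Char)
  | [] => []
  | c :: rest => (if rest.head? = some '.' then [c, '.'] else [c]) :: pvFinal rest

lemma pvFinal_length (cs : List Char) : (pvFinal cs).length = cs.length := by
  induction cs with
  | nil => rfl
  | cons c rest ih => simp [pvFinal, ih]

lemma pvFinal_getElem (cs : List Char) (j : Nat) (h : j < cs.length) :
    (pvFinal cs)[j]'(by rw [pvFinal_length]; exact h) =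
      if cs[j+1]? = some '.' then [cs[j], '.'] else [cs[j]] := by
  induction cs generalizing j with
  | nil => simp at h
  | cons c rest ih =>
    cases j with
    | zero => simp [pvFinal, List.head?_eq_getElem?]
    | succ j =>
      simpa [pvFinal] using ih j (by simpa using h)

lemma pvAltGo_eq_filter (cs : List Char) :
    pvAltGo cs = (pvFinal cs).filter (fun x => x ≠ ['.']) := by
  induction cs with
  | nil => rfl
  | cons c rest ih =>
    simp only [pvAltGo, pvFinal, List.filter_cons]
    split_ifs with h1 h2 h2 <;> simp_all

lemma pvErase_filter (arr : List (List Char)) :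
    (arr.erase ['.']).filter (fun x => x ≠ ['.']) = arr.filter (fun x => x ≠ ['.']) := by
  induction arr with
  | nil => rfl
  | cons a arr ih =>
    rw [List.erase_cons]
    by_cases h : a = ['.']
    · simp [h]
    · rw [if_neg (by simpa using h), List.filter_cons, List.filter_cons, ih]

lemma pvWhileRemove_eq (fuel : Nat) (arr : List (List Char)) (hf : arr.length ≤ fuel) :
    pvWhileRemove fuel arr = arr.filter (fun x => x ≠ ['.']) := by
  induction fuel generalizing arr with
  | zero =>
    have : arr = [] := List.length_eq_zero_iff.mp (Nat.le_zero.mp hf)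
    simp [this, pvWhileRemove]
  | succ fuel ih =>
    rw [pvWhileRemove]
    by_cases h : ['.'] ∈ arr
    · rw [if_pos h, ih _ (by have := List.length_erase_of_mem h; omega), pvErase_filter]
    · rw [if_neg h, List.filter_eq_self.mpr]
      intro a ha
      simp only [ne_eq, decide_eq_true_eq]
      exact fun e => h (e ▸ ha)

-- loop invariant for A's first pass: before iteration k (1 ≤ k ≤ n), positions < k-1 are final,
-- positions ≥ k-1 still hold their original single character
lemma pvLoop (cs : List Char) (m k : Nat) (hm : cs.length - k = m)
    (h1 : 1 ≤ k) (h2 : k ≤ cs.length) :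
    (PySem.List.pyRange (k : Int) (cs.length : Int) 1).foldl pvStep
      ((pvFinal cs).take (k - 1) ++ (pvOrig cs).drop (k - 1)) = pvFinal cs := by
  have hlenF : (pvFinal cs).length = cs.length := pvFinal_length cs
  have hlenO : (pvOrig cs).length = cs.length := by simp [pvOrig]
  induction m generalizing k with
  | zero =>
    have hk : k = cs.length := by omega
    subst hk
    rw [PySem.List.pyRange_one_eq_nil (by omega)]
    simp only [List.foldl_nil]
    -- remaining: F.take (n-1) ++ O.drop (n-1) = F
    apply List.ext_getElem
    · simp [hlenF, hlenO]
    · intro i hi _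
      have hn : 1 ≤ cs.length := h1
      have hlen_take : ((pvFinal cs).take (cs.length - 1)).length = cs.length - 1 := by
        simp [hlenF]
      by_cases hilt : i < cs.length - 1
      · rw [List.getElem_append_left (by omega)]
        simp [List.getElem_take]
      · have hieq : i = cs.length - 1 := by
          have : i < cs.length := by
            simpa [hlenF, hlenO] using hi
          omega
        subst hieq
        rw [List.getElem_append_right (by omega)]
        rw [List.getElem_drop]
        rw [pvFinal_getElem cs (cs.length - 1) (by omega)]
        have hnone : cs[(cs.length - 1) + 1]? = none := by
          rw [List.getElem?_eq_none]; omega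
        rw [hnone]
        simp [pvOrig, hlen_take]
  | succ m ih =>
    have hk : k < cs.length := by omega
    rw [PySem.List.pyRange_one_cons (by exact_mod_cast hk)]
    rw [List.foldl_cons]
    have hcast : ((k : Int) + 1) = ((k + 1 : Nat) : Int) := by push_cast; ring
    set s := (pvFinal cs).take (k - 1) ++ (pvOrig cs).drop (k - 1) with hs
    have hlen_take : ((pvFinal cs).take (k - 1)).length = k - 1 := by
      simp [hlenF]; omega
    have hslen : s.length = cs.length := by
      simp [hs, hlenF, hlenO]; omega
    -- s[k]? = original cell [cs[k]]
    have hsk : s[k]? = some [cs[k]] := by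
      rw [hs, List.getElem?_append_right (by omega), hlen_take]
      have : k - (k - 1) = 1 := by omega
      rw [this, List.getElem?_drop]
      have : (k - 1) + 1 = k := by omega
      rw [this]
      simp [pvOrig, List.getElem?_map, List.getElem?_eq_getElem hk]
    have hskm1 : s[k-1]? = some [cs[k-1]] := by
      rw [hs, List.getElem?_append_right (by omega), hlen_take]
      have : (k - 1) - (k - 1) = 0 := by omega
      rw [this, List.getElem?_drop]
      have : (k - 1) + 0 = k - 1 := by omega
      rw [this]
      simp [pvOrig, List.getElem?_map, List.getElem?_eq_getElem (by omega : k - 1 < cs.length)]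
    -- the state after this iteration
    have hnext : pvStep s (k : Int) = (pvFinal cs).take k ++ (pvOrig cs).drop k := by
      have hFk1 : (pvFinal cs)[k-1]'(by omega) =
          if cs[(k-1)+1]? = some '.' then [cs[k-1], '.'] else [cs[k-1]] :=
        pvFinal_getElem cs (k-1) (by omega)
      have hk1succ : (k - 1) + 1 = k := by omega
      have hcsk : cs[k]? = some (cs[k]'hk) := List.getElem?_eq_getElem hk
      have htake : (pvFinal cs).take k = (pvFinal cs).take (k-1) ++ [(pvFinal cs)[k-1]'(by omega)] := by
        conv_lhs => rw [show k = (k-1) + 1 by omega]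
        rw [List.take_add_one]
        simp [List.getElem?_eq_getElem (show k - 1 < (pvFinal cs).length by omega)]
      have hdropO : (pvOrig cs).drop (k-1) = [cs[k-1]'(by omega)] :: (pvOrig cs).drop k := by
        rw [List.drop_eq_getElem_cons (by omega)]
        simp [pvOrig, hk1succ, List.getElem_map]
      unfold pvStep
      rw [PySem.List.pyGet?_natCast, hsk]
      by_cases hdot : cs[k]'hk = '.'
      · rw [if_pos (by simp [hdot])]
        have hcastm1 : ((k : Int) - 1) = ((k - 1 : Nat) : Int) := by push_cast [h1]; ring
        rw [hcastm1, PySem.List.pySetD_natCast, PySem.List.pyGetD_natCast, PySem.List.pyGetD_natCast]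
        have hgD1 : s.getD (k-1) [] = [cs[k-1]'(by omega)] := by
          simp [List.getD_eq_getElem?_getD, hskm1]
        have hgD2 : s.getD k [] = [cs[k]'hk] := by
          simp [List.getD_eq_getElem?_getD, hsk]
        rw [hgD1, hgD2]
        have hFval : (pvFinal cs)[k-1]'(by omega) = [cs[k-1]'(by omega), '.'] := by
          rw [hFk1, hk1succ, hcsk, if_pos (by rw [hdot])]
        rw [hs, List.set_append]
        rw [if_neg (by rw [hlen_take]; omega)]
        rw [hlen_take]
        have : (k - 1) - (k - 1) = 0 := by omega
        rw [this, hdropO, List.set_cons_zero]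
        rw [htake, hFval]
        simp [hdot]
      · rw [if_neg (by simp [hdot])]
        have hFval : (pvFinal cs)[k-1]'(by omega) = [cs[k-1]'(by omega)] := by
          rw [hFk1, hk1succ, hcsk, if_neg (by simp [hdot])]
        rw [hs, htake, hFval, hdropO]
        simp
    rw [hnext, hcast]
    exact ih (k+1) (by omega) (by omega) (by omega)

-- A's first pass computes pvFinal whenever the string does not start with a dot
lemma pvFold_eq_final (cs : List Char) (hnd : cs.head? ≠ some '.') :
    (PySem.List.pyRange 0 ((pvOrig cs).length : Int) 1).foldl pvStep (pvOrig cs) = pvFinal cs := by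
  have hlenO : (pvOrig cs).length = cs.length := by simp [pvOrig]
  rw [hlenO]
  cases cs with
  | nil => rw [PySem.List.pyRange_one_eq_nil (by simp)]; rfl
  | cons c rest =>
    have hpos : (0 : Int) < ((c :: rest).length : Int) := by
      exact_mod_cast Nat.succ_pos rest.length
    rw [PySem.List.pyRange_one_cons hpos, List.foldl_cons]
    have hc : c ≠ '.' := by simpa using hnd
    have hstep : pvStep (pvOrig (c :: rest)) 0 = pvOrig (c :: rest) := by
      unfold pvStep
      rw [if_neg]
      simp [pvOrig, hc]
    rw [hstep]
    have := pvLoop (c :: rest) ((c :: rest).length - 1) 1 (by simp) (by omega) (by simp)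
    simpa using this

-- ===== VERDICT (by name: the statement is the Claim_ definition above) =====
theorem splitToDisplay_spec : Claim_unchanged_splitToDisplay := by
  intro t _ hnd
  have hnd' : t.toList.head? ≠ some '.' := hnd
  simp only [splitToDisplay, splitToDisplay_alt]
  rw [pvFold_eq_final t.toList hnd', pvWhileRemove_eq _ _ (le_refl _), pvAltGo_eq_filter]

theorem splitToDisplay_changed : Claim_changed_splitToDisplay := by
  unfold Claim_changed_splitToDisplay; decide
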